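-- pv_equiv track=rewrite | github.com/torodean/DnD | mmorpdnd.py | move_dir_items_to_end
-- ===== SOURCE A (Python) =====
-- def move_dir_items_to_end(string):
--     """
--     Moves directory items (lines containing "/index.html") to the end of the input string.
--
--     This method takes a multi-line string as input and separates lines that contain "/index.html"
--     (directory items) from other lines (non-directory items). It then rearranges the lines by moving
--     the directory items to the end while maintaining the order of non-directory items.
--
--     Args:
--         string (str): The input multi-line string to be processed.
--
--     Returns:
--         str: A modified string with directory items moved to the end.
--
--     Example:
--         input_string = "Line 1\n/index.html\nLine 2\nLine 3\n/index.html"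
--         result = move_dir_items_to_end(input_string)
--         # result will be "Line 1\nLine 2\nLine 3\n/index.html\n/index.html"
--     """
--     lines = string.split('\n')
--     dir_items = []
--     non_dir_items = []
--
--     for line in lines:
--         if "/index.html" in line:
--             dir_items.append(line)
--         else:
--             non_dir_items.append(line)
--
--     new_lines = non_dir_items + dir_items
--     new_string = '\n'.join(new_lines)
--
--     return new_string
-- ===== SOURCE B (Python) =====
-- def move_dir_items_to_end(string):
--     # Stable sort on a boolean key: non-index lines (False) keep order and
--     # come first, index lines (True) keep order and go last.
--     return '\n'.join(sorted(string.split('\n'), key=lambda line: "/index.html" in line))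
-- ===== Notes on version B (the rewrite author's own statement) =====
-- stated objective: idiomatic
-- what changed: Replaces the explicit two-accumulator partition loop with a single stable sort keyed on whether the line contains the index-page marker, then joins.
import Mathlib
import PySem

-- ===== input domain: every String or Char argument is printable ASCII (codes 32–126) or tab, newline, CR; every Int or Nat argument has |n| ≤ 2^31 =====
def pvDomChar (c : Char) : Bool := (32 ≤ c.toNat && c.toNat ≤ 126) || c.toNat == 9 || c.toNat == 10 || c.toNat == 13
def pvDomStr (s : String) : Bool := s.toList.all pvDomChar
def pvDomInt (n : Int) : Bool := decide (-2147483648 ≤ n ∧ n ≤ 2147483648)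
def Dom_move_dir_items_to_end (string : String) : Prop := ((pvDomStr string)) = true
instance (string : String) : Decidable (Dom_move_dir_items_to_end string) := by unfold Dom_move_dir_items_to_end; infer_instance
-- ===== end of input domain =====

-- B replaces A's explicit two-accumulator partition loop with a single stable sort
-- keyed on the boolean "'/index.html' in line" (idiomatic; same return value).


-- ===== PORT A =====
-- lines = string.split('\n'); partition into dir_items / non_dir_items; join non ++ dir
def move_dir_items_to_end (string : String) : String :=
  let lines := PySem.Chars.splitOn string.toList "\n".toList
  let acc := lines.foldl
    (fun (acc : List (List Char) × List (List Char)) line =>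
      if PySem.Chars.isIn "/index.html".toList line then (acc.1 ++ [line], acc.2)
      else (acc.1, acc.2 ++ [line]))
    ([], [])
  String.ofList (PySem.Chars.join "\n".toList (acc.2 ++ acc.1))

-- ===== PORT B =====
-- '\n'.join(sorted(string.split('\n'), key=lambda line: "/index.html" in line))
def move_dir_items_to_end_alt (string : String) : String :=
  String.ofList (PySem.Chars.join "\n".toList
    (PySem.List.sorted (PySem.Chars.splitOn string.toList "\n".toList)
      (fun line => PySem.Chars.isIn "/index.html".toList line)))

-- ===== PRECONDITION & SPEC =====
def Spec_move_dir_items_to_end (string : String) (out : String) : Prop := out = move_dir_items_to_end_alt string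
instance (string : String) (out : String) : Decidable (Spec_move_dir_items_to_end string out) := by unfold Spec_move_dir_items_to_end; infer_instance

-- ===== CLAIM (what is proved, stated in full; the proofs are below) =====
def Claim_equal_move_dir_items_to_end : Prop := ∀ (string : String), Dom_move_dir_items_to_end string → Spec_move_dir_items_to_end string (move_dir_items_to_end string)

-- ===== LEMMAS AND PROOFS =====

-- inserting x before the first element it 'goes before' lands exactly between N (all false) and D (all true)
theorem pv_insertBy_mid {α : Type} (before : α → α → Bool) (x : α) (N D : List α)
    (hN : ∀ y ∈ N, before x y = false) (hD : ∀ y ∈ D, before x y = true) :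
    PySem.List.insertBy before x (N ++ D) = N ++ x :: D := by
  induction N with
  | nil =>
    cases D with
    | nil => simp [PySem.List.insertBy]
    | cons d D' => simp [PySem.List.insertBy, hD d (by simp)]
  | cons n N' ih =>
    simp [PySem.List.insertBy, hN n (by simp)]
    exact ih (fun y hy => hN y (by simp [hy]))

-- loop invariant: folding insertBy over the remaining lines, starting from N ++ D
-- (N key-false in order, D key-true in order), equals A's partition fold result
theorem pv_fold_eq {α : Type} (key : α → Bool) (lines N D : List α)
    (hN : ∀ y ∈ N, key y = false) (hD : ∀ y ∈ D, key y = true) :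
    lines.foldl (fun acc x => PySem.List.insertBy (fun a b => decide (key a < key b)) x acc) (N ++ D)
      = (lines.foldl
          (fun (acc : List α × List α) line =>
            if key line then (acc.1 ++ [line], acc.2) else (acc.1, acc.2 ++ [line]))
          (D, N)).2
        ++ (lines.foldl
          (fun (acc : List α × List α) line =>
            if key line then (acc.1 ++ [line], acc.2) else (acc.1, acc.2 ++ [line]))
          (D, N)).1 := by
  induction lines generalizing N D with
  | nil => simp
  | cons l ls ih =>
    by_cases h : key l = true
    · have : PySem.List.insertBy (fun a b => decide (key a < key b)) l (N ++ D)
          = (N ++ D) ++ [l] := by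
        apply PySem.List.insertBy_of_forall_not_before
        intro y _; simp [h]
      have hD' : ∀ y ∈ D ++ [l], key y = true := by
        intro y hy
        rcases List.mem_append.1 hy with hy | hy
        · exact hD y hy
        · simp at hy; simp [hy, h]
      simp only [List.foldl_cons, this, h, List.append_assoc]
      exact ih N (D ++ [l]) hN hD'
    · have h' : key l = false := by simpa using h
      have : PySem.List.insertBy (fun a b => decide (key a < key b)) l (N ++ D)
          = (N ++ [l]) ++ D := by
        have := pv_insertBy_mid (fun a b => decide (key a < key b)) l N D
          (fun y hy => by simp [h', hN y hy])
          (fun y hy => by simp [h', hD y hy])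
        simpa using this
      have hN' : ∀ y ∈ N ++ [l], key y = false := by
        intro y hy
        rcases List.mem_append.1 hy with hy | hy
        · exact hN y hy
        · simp at hy; simp [hy, h']
      simp only [List.foldl_cons, this, h', Bool.false_eq_true, if_false]
      exact ih (N ++ [l]) D hN' hD

theorem pv_sorted_eq_partition {α : Type} (key : α → Bool) (lines : List α) :
    PySem.List.sorted lines key
      = (lines.foldl
          (fun (acc : List α × List α) line =>
            if key line then (acc.1 ++ [line], acc.2) else (acc.1, acc.2 ++ [line]))
          ([], [])).2
        ++ (lines.foldl
          (fun (acc : List α × List α) line =>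
            if key line then (acc.1 ++ [line], acc.2) else (acc.1, acc.2 ++ [line]))
          ([], [])).1 := by
  rw [PySem.List.sorted_eq_foldl_insertBy]
  simpa using pv_fold_eq key lines [] [] (by simp) (by simp)

-- ===== VERDICT (by name: the statement is the Claim_ definition above) =====
theorem move_dir_items_to_end_spec : Claim_equal_move_dir_items_to_end := by
  intro string _
  unfold Spec_move_dir_items_to_end move_dir_items_to_end move_dir_items_to_end_alt
  rw [pv_sorted_eq_partition]
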